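-- pv_equiv track=rewrite | github.com/wzygxr/shuati | class013_CircularDequeAndMonotonicQueue/CircularDeque.py | atCoderDPL_Deque
-- ===== SOURCE A (Python) =====
-- from typing import List, Tuple
--
-- def atCoderDPL_Deque(a: List[int]) -> int:
--     """
--     AtCoder DP Contest L - Deque
--     链接：https://atcoder.jp/contests/dp/tasks/dp_l
--     使用区间DP+博弈论。时间O(n^2)，空间O(n^2)。
--     """
--     if not a:
--         return 0
--
--     n = len(a)
--     dp = [[0] * n for _ in range(n)]
--
--     for i in range(n):
--         dp[i][i] = a[i]
--
--     for length in range(2, n + 1):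
--         for l in range(n - length + 1):
--             r = l + length - 1
--             dp[l][r] = max(a[l] - dp[l + 1][r], a[r] - dp[l][r - 1])
--
--     return dp[0][n - 1]
-- ===== SOURCE B (Python) =====
-- from typing import List, Tuple
--
-- def atCoderDPL_Deque(a: List[int]) -> int:
--     # Top-down memoized recursion instead of a bottom-up length-by-length table:
--     # solve(l, r) is the best score difference the mover can force on a[l..r],
--     # computed lazily in recursive order with a dict memo.
--     if not a:
--         return 0
--     memo = {}
--     def solve(l: int, r: int) -> int:
--         v = memo.get((l, r))
--         if v is not None:
--             return v
--         if l == r: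
--             v = a[l]
--         else:
--             v = max(a[l] - solve(l + 1, r), a[r] - solve(l, r - 1))
--         memo[(l, r)] = v
--         return v
--     return solve(0, len(a) - 1)
-- ===== Notes on version B (the rewrite author's own statement) =====
-- stated objective: alternative
-- what changed: Replaced the bottom-up n-by-n table filled by increasing interval length with a lazy top-down memoized recursion solve(l, r) over a dict, evaluating subintervals in recursive order.
import Mathlib
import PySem

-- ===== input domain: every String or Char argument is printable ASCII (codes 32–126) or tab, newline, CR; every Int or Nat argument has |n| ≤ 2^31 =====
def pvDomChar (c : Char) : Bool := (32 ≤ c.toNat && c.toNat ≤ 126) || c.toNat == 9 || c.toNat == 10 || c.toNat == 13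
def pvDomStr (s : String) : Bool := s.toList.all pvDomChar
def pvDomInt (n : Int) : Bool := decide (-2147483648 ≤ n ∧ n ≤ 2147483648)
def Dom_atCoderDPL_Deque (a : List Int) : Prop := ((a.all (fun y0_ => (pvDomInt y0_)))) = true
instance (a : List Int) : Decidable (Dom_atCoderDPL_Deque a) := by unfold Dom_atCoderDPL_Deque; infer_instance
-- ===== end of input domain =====

-- B replaces A's bottom-up length-by-length table with a lazy top-down memoized
-- recursion over a dict (different decomposition, same asymptotic cost).

-- ===== PORT A =====
-- A's 2-D table dp is modelled as a function Nat → Nat → Int; assignment dp[l][r] = v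
-- is the pointwise update. Loops become folds over the same index sequences.
def aDiagStep (a : List Int) (dp : Nat → Nat → Int) (i : Nat) : Nat → Nat → Int :=
  fun i' j' => if i' = i ∧ j' = i then a.getD i 0 else dp i' j'

def aLenStep (a : List Int) (len : Nat) (dp : Nat → Nat → Int) (l : Nat) : Nat → Nat → Int :=
  let r := l + len - 1
  fun i' j' =>
    if i' = l ∧ j' = r then
      max (a.getD l 0 - dp (l + 1) r) (a.getD r 0 - dp l (r - 1))
    else dp i' j'

def atCoderDPL_Deque (a : List Int) : Int :=
  if a = [] then 0
  else
    let n := a.length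
    let dpd := (List.range n).foldl (aDiagStep a) (fun _ _ => (0 : Int))
    -- for length in range(2, n+1): length = k + 2 for k in range(n-1)
    let dpf := (List.range (n - 1)).foldl
      (fun dp k => (List.range (n - (k + 2) + 1)).foldl (aLenStep a (k + 2)) dp) dpd
    dpf 0 (n - 1)

-- ===== PORT B =====
-- Source B's solve(l, r) with its dict memo threaded through; returns (value, memo').
-- Source B tests 'l == r'; the Lean guard is 'l < r' so that the recursion is total —
-- solve is only ever reached with l ≤ r, where the two guards coincide.
def bSolve (a : List Int) (l r : Nat) (memo : PySem.Dict (Nat × Nat) Int) :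
    Int × PySem.Dict (Nat × Nat) Int :=
  match memo.get? (l, r) with
  | some v => (v, memo)
  | none =>
    if _h : l < r then
      let p1 := bSolve a (l + 1) r memo
      let p2 := bSolve a l (r - 1) p1.2
      let v := max (a.getD l 0 - p1.1) (a.getD r 0 - p2.1)
      (v, p2.2.insert (l, r) v)
    else
      (a.getD l 0, memo.insert (l, r) (a.getD l 0))
termination_by r - l
decreasing_by all_goals omega

def atCoderDPL_Deque_alt (a : List Int) : Int :=
  if a = [] then 0
  else (bSolve a 0 (a.length - 1) PySem.Dict.empty).1

-- ===== PRECONDITION & SPEC =====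
def Spec_atCoderDPL_Deque (a : List Int) (out : Int) : Prop := out = atCoderDPL_Deque_alt a
instance (a : List Int) (out : Int) : Decidable (Spec_atCoderDPL_Deque a out) := by unfold Spec_atCoderDPL_Deque; infer_instance

-- ===== CLAIM (what is proved, stated in full; the proofs are below) =====
def Claim_equal_atCoderDPL_Deque : Prop := ∀ (a : List Int), Dom_atCoderDPL_Deque a → Spec_atCoderDPL_Deque a (atCoderDPL_Deque a)

-- ===== LEMMAS AND PROOFS =====

-- Pure specification: game value of the interval [l, r].
def solveP (a : List Int) (l r : Nat) : Int :=
  if l < r then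
    max (a.getD l 0 - solveP a (l + 1) r) (a.getD r 0 - solveP a l (r - 1))
  else a.getD l 0
termination_by r - l
decreasing_by all_goals omega

theorem solveP_lt (a : List Int) (l r : Nat) (h : l < r) :
    solveP a l r = max (a.getD l 0 - solveP a (l + 1) r) (a.getD r 0 - solveP a l (r - 1)) := by
  rw [solveP]; simp [h]

theorem solveP_ge (a : List Int) (l r : Nat) (h : ¬ l < r) :
    solveP a l r = a.getD l 0 := by
  rw [solveP]; simp [h]

-- A-side: the diagonal loop.
theorem diagA (a : List Int) (m : Nat) (d : Nat → Nat → Int) (i j : Nat) :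
    ((List.range m).foldl (aDiagStep a) d) i j
      = if i = j ∧ i < m then a.getD i 0 else d i j := by
  induction m generalizing i j with
  | zero => simp
  | succ m ih =>
    rw [List.range_succ, List.foldl_append]
    simp only [List.foldl_cons, List.foldl_nil, aDiagStep]
    by_cases h : i = m ∧ j = m
    · simp [h.1, h.2]
    · rw [if_neg h, ih]
      by_cases h1 : i = j ∧ i < m
      · rw [if_pos h1, if_pos ⟨h1.1, by omega⟩]
      · rw [if_neg h1, if_neg]
        intro ⟨hij, him⟩
        exact h1 ⟨hij, by omega⟩

-- A-side: one inner pass at interval length `len`.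
theorem innerA (a : List Int) (len : Nat) (hlen : 2 ≤ len) (m : Nat)
    (hm : m + len ≤ a.length + 1) (dp : Nat → Nat → Int)
    (hdp : ∀ i j, i ≤ j → j < a.length → j + 2 ≤ i + len → dp i j = solveP a i j)
    (i j : Nat) :
    ((List.range m).foldl (aLenStep a len) dp) i j
      = if i < m ∧ j = i + len - 1 then solveP a i j else dp i j := by
  induction m generalizing i j with
  | zero => simp
  | succ m ih =>
    have hm' : m + len ≤ a.length + 1 := by omega
    rw [List.range_succ, List.foldl_append]
    simp only [List.foldl_cons, List.foldl_nil, aLenStep]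
    by_cases h : i = m ∧ j = m + len - 1
    · rw [if_pos h, if_pos (by omega)]
      have h1 : (List.range m).foldl (aLenStep a len) dp (m + 1) (m + len - 1)
          = solveP a (m + 1) (m + len - 1) := by
        rw [ih hm', if_neg (by omega)]
        exact hdp _ _ (by omega) (by omega) (by omega)
      have h2 : (List.range m).foldl (aLenStep a len) dp m (m + len - 1 - 1)
          = solveP a m (m + len - 2) := by
        have : m + len - 1 - 1 = m + len - 2 := by omega
        rw [this, ih hm', if_neg (by omega)]
        exact hdp _ _ (by omega) (by omega) (by omega)
      rw [h1, h2, h.1, h.2, solveP_lt a m (m + len - 1) (by omega)]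
      have : m + len - 1 - 1 = m + len - 2 := by omega
      rw [this]
    · rw [if_neg h, ih hm']
      by_cases h1 : i < m ∧ j = i + len - 1
      · rw [if_pos h1, if_pos ⟨by omega, h1.2⟩]
      · rw [if_neg h1, if_neg (by omega)]

-- A-side: the outer loop over lengths 2 .. t+1.
theorem outerA (a : List Int) (t : Nat) (ht : t + 1 ≤ a.length) (i j : Nat)
    (hij : i ≤ j) (hjn : j < a.length) (hjt : j ≤ i + t) :
    ((List.range t).foldl
      (fun dp k => (List.range (a.length - (k + 2) + 1)).foldl (aLenStep a (k + 2)) dp)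
      ((List.range a.length).foldl (aDiagStep a) (fun _ _ => (0 : Int)))) i j
      = solveP a i j := by
  induction t generalizing i j with
  | zero =>
    have hij' : i = j := by omega
    simp only [List.range_zero, List.foldl_nil]
    rw [diagA, if_pos ⟨hij', by omega⟩, hij', solveP_ge a j j (by omega)]
  | succ t ih =>
    rw [List.range_succ, List.foldl_append, List.foldl_cons, List.foldl_nil]
    rw [innerA a (t + 2) (by omega) (a.length - (t + 2) + 1) (by omega) _
      (fun i' j' hij' hjn' hlen' => ih (by omega) i' j' hij' hjn' (by omega))]
    by_cases h : i < a.length - (t + 2) + 1 ∧ j = i + (t + 2) - 1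
    · rw [if_pos h]
    · rw [if_neg h]
      exact ih (by omega) i j hij hjn (by omega)

theorem A_eq_solveP (a : List Int) (h : a ≠ []) :
    atCoderDPL_Deque a = solveP a 0 (a.length - 1) := by
  have hn : 1 ≤ a.length := by
    cases a with
    | nil => exact absurd rfl h
    | cons x xs => simp
  rw [atCoderDPL_Deque, if_neg h]
  exact outerA a (a.length - 1) (by omega) 0 (a.length - 1) (by omega) (by omega) (by omega)

-- B-side: the memo invariant — every stored value is the game value of its interval.
def bInv (a : List Int) (memo : PySem.Dict (Nat × Nat) Int) : Prop :=
  ∀ l r v, memo.get? (l, r) = some v → v = solveP a l r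

theorem bSolve_correct (a : List Int) (k : Nat) :
    ∀ (l r : Nat) (memo : PySem.Dict (Nat × Nat) Int), r - l ≤ k → bInv a memo →
      (bSolve a l r memo).1 = solveP a l r ∧ bInv a (bSolve a l r memo).2 := by
  induction k with
  | zero =>
    intro l r memo hk h
    have hlr : ¬ l < r := by omega
    rw [bSolve]
    cases hg : memo.get? (l, r) with
    | some v => exact ⟨h l r v hg, h⟩
    | none =>
      simp only [hlr, dite_false]
      refine ⟨(solveP_ge a l r hlr).symm, fun l' r' v' hv' => ?_⟩
      rw [PySem.Dict.get?_insert] at hv'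
      by_cases he : (l', r') = (l, r)
      · rw [if_pos he] at hv'
        obtain ⟨h1, h2⟩ := Prod.mk.injEq .. ▸ he
        cases hv'
        rw [h1, h2, solveP_ge a l r hlr]
      · rw [if_neg he] at hv'
        exact h l' r' v' hv'
  | succ k ih =>
    intro l r memo hk h
    rw [bSolve]
    cases hg : memo.get? (l, r) with
    | some v => exact ⟨h l r v hg, h⟩
    | none =>
      by_cases hlr : l < r
      · simp only [hlr, dite_true]
        obtain ⟨e1, i1⟩ := ih (l + 1) r memo (by omega) h
        obtain ⟨e2, i2⟩ := ih l (r - 1) _ (by omega) i1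
        refine ⟨?_, fun l' r' v' hv' => ?_⟩
        · rw [e1, e2, solveP_lt a l r hlr]
        · rw [PySem.Dict.get?_insert] at hv'
          by_cases he : (l', r') = (l, r)
          · rw [if_pos he] at hv'
            obtain ⟨h1, h2⟩ := Prod.mk.injEq .. ▸ he
            cases hv'
            rw [h1, h2, e1, e2, solveP_lt a l r hlr]
          · rw [if_neg he] at hv'
            exact i2 l' r' v' hv'
      · simp only [hlr, dite_false]
        refine ⟨(solveP_ge a l r hlr).symm, fun l' r' v' hv' => ?_⟩
        rw [PySem.Dict.get?_insert] at hv'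
        by_cases he : (l', r') = (l, r)
        · rw [if_pos he] at hv'
          obtain ⟨h1, h2⟩ := Prod.mk.injEq .. ▸ he
          cases hv'
          rw [h1, h2, solveP_ge a l r hlr]
        · rw [if_neg he] at hv'
          exact h l' r' v' hv'

theorem B_eq_solveP (a : List Int) (h : a ≠ []) :
    atCoderDPL_Deque_alt a = solveP a 0 (a.length - 1) := by
  rw [atCoderDPL_Deque_alt, if_neg h]
  exact (bSolve_correct a (a.length - 1) 0 (a.length - 1) PySem.Dict.empty (by omega)
    (fun l r v hv => by simp [PySem.Dict.get?_empty] at hv)).1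

-- ===== VERDICT (by name: the statement is the Claim_ definition above) =====
theorem atCoderDPL_Deque_spec : Claim_equal_atCoderDPL_Deque := by
  intro a _
  unfold Spec_atCoderDPL_Deque
  by_cases h : a = []
  · rw [h]; rfl
  · rw [A_eq_solveP a h, B_eq_solveP a h]
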